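-- pv_equiv track=rewrite | github.com/sunghj1118/algorithm | BAEKJOON/DP/2775.py | apartment
-- ===== SOURCE A (Python) =====
-- def apartment(k, n):
--     dp = [[0] * (n+1) for _ in range(k+1)]
--
--     for i in range(k + 1):
--         for j in range(n + 1):
--             if i == 0:
--                 dp[i][j] = j + 1
--             elif j == 0:
--                 dp[i][j] = 1
--             else:
--                 dp[i][j] = dp[i][j - 1] + dp[i - 1][j]
--
--     return dp[k][n-1]
-- ===== SOURCE B (Python) =====
-- def apartment(k, n):
--     # residents on floor k, unit n = C(k+n, n-1) = C(k+n, k+1):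
--     # multiplicative binomial over the smaller exponent, O(min(k, n)) time
--     m = k + n
--     r = n - 1
--     if r > m - r:
--         r = m - r
--     if r < 0:
--         return 0
--     res = 1
--     for i in range(r):
--         res = res * (m - i) // (i + 1)
--     return res
-- ===== Notes on version B (the rewrite author's own statement) =====
-- stated objective: faster
-- what changed: Replaced the O(k*n) DP table with the closed-form binomial coefficient C(k+n, k+1) = C(k+n, n-1), computed by an O(min(k, n)) multiplicative loop over the smaller exponent.
-- intended difference: For n = 0 (unit number zero, outside the problem's 1-based units) A returns dp[k][-1] = 1 only by negative-index wraparound onto the last table entry, while B's closed form C(k, k+1) gives 0, the intended count of residents in a nonexistent unit. — e.g. on apartment(1, 0): A returns 1, B returns 0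
import Mathlib
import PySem

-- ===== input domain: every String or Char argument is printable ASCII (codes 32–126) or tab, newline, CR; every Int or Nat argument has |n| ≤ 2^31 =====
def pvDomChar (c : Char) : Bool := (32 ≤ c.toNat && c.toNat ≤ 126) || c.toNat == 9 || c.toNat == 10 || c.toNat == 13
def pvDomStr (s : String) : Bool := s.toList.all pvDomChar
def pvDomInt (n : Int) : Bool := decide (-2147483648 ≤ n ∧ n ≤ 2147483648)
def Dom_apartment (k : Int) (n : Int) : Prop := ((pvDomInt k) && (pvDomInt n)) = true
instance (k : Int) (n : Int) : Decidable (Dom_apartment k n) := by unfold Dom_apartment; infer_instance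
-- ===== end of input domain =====

-- B replaces A's O(k*n) DP table with the closed-form binomial C(k+n, k+1) computed in O(k);
-- at n = 0 A returns 1 only via the negative-index wraparound dp[k][-1], B returns the intended 0 (see D_).


-- ===== PORT A =====
-- dp is built row by row: the in-place writes dp[i][j] = … are the appends of the two folds
-- (each cell is written once, after the cells it reads), reads use Python indexing (pyGet?).
def apartment (k : Int) (n : Int) : Int :=
  let dp : List (List Int) :=
    (PySem.List.pyRange 0 (k + 1) 1).foldl (fun dp i =>
      dp ++ [(PySem.List.pyRange 0 (n + 1) 1).foldl (fun row j =>
          row ++ [if i = 0 then j + 1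
                  else if j = 0 then 1
                  else ((PySem.List.pyGet? row (j - 1)).getD 0) +
                       (((PySem.List.pyGet? dp (i - 1)).bind
                           (fun r => PySem.List.pyGet? r j)).getD 0)]) []]) []
  ((PySem.List.pyGet? dp k).bind (fun r => PySem.List.pyGet? r (n - 1))).getD 0

-- ===== PORT B =====
def apartment_alt (k : Int) (n : Int) : Int :=
  let m := k + n
  let r := if n - 1 > m - (n - 1) then m - (n - 1) else n - 1
  if r < 0 then 0
  else
    (PySem.List.pyRange 0 r 1).foldl
      (fun res i => PySem.Int.floordiv (res * (m - i)) (i + 1)) 1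

-- ===== PRECONDITION & SPEC =====
-- A raises IndexError when k < 0 (dp[k] on an empty table) or n < 0 (dp[k][n-1] on an empty row).
def Pre_apartment (k : Int) (n : Int) : Prop := 0 ≤ k ∧ 0 ≤ n
instance (k : Int) (n : Int) : Decidable (Pre_apartment k n) := by unfold Pre_apartment; infer_instance
def pvWitness_apartment : Int × Int := (3, 4)

-- For n = 0 A returns 1 only because dp[k][-1] wraps to the last table entry; B's closed form
-- C(k, k+1) gives 0, the intended resident count for a nonexistent unit 0.
def D_apartment (k : Int) (n : Int) : Prop := n = 0
instance (k : Int) (n : Int) : Decidable (D_apartment k n) := by unfold D_apartment; infer_instance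

def Spec_apartment (k : Int) (n : Int) (out : Int) : Prop := ¬ D_apartment k n → out = apartment_alt k n
instance (k : Int) (n : Int) (out : Int) : Decidable (Spec_apartment k n out) := by unfold Spec_apartment; infer_instance

def pvDiffWitness_apartment : Int × Int := (1, 0)
def pvDiffWitnessOut_apartment : Int × Int := (1, 0)

-- ===== CLAIM (what is proved, stated in full; the proofs are below) =====
def Claim_unchanged_apartment : Prop := ∀ (k : Int) (n : Int), Dom_apartment k n → Pre_apartment k n → Spec_apartment k n (apartment k n)
def Claim_changed_apartment : Prop := Dom_apartment (pvDiffWitness_apartment.1) (pvDiffWitness_apartment.2) ∧ Pre_apartment (pvDiffWitness_apartment.1) (pvDiffWitness_apartment.2) ∧ D_apartment (pvDiffWitness_apartment.1) (pvDiffWitness_apartment.2) ∧ apartment (pvDiffWitness_apartment.1) (pvDiffWitness_apartment.2) = pvDiffWitnessOut_apartment.1 ∧ apartment_alt (pvDiffWitness_apartment.1) (pvDiffWitness_apartment.2) = pvDiffWitnessOut_apartment.2 ∧ pvDiffWitnessOut_apartment.1 ≠ pvDiffWitnessOut_apartment.2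
def Claim_exact_apartment : Prop := ∀ (k : Int) (n : Int), Dom_apartment k n → Pre_apartment k n → D_apartment k n → apartment k n ≠ apartment_alt k n

-- ===== LEMMAS AND PROOFS =====

-- the DP cell value: dp[i][j] = C(i+j+1, j)
def dpCell (i j : Nat) : Int := ((i + j + 1).choose j : Int)

theorem row_fold_spec (N : Nat) (i : Int) (dp : List (List Int)) (t : Nat) (ht : t ≤ N + 1)
    (hread : ∀ j : Nat, j ≤ N → i ≠ 0 →
      (((PySem.List.pyGet? dp (i - 1)).bind (fun r => PySem.List.pyGet? r (j : Int))).getD 0)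
        = dpCell (i - 1).toNat j) (hi : 0 ≤ i) :
    (PySem.List.pyRange 0 (t : Int) 1).foldl (fun row j =>
        row ++ [if i = 0 then j + 1
                else if j = 0 then 1
                else ((PySem.List.pyGet? row (j - 1)).getD 0) +
                     (((PySem.List.pyGet? dp (i - 1)).bind
                         (fun r => PySem.List.pyGet? r j)).getD 0)]) []
      = (List.range t).map (fun j => dpCell i.toNat j) := by
  induction t with
  | zero => simp
  | succ t ih =>
    have ht' : t ≤ N + 1 := Nat.le_of_succ_le ht
    have hsplit : PySem.List.pyRange 0 ((t : Nat) + 1 : Int) 1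
        = PySem.List.pyRange 0 (t : Int) 1 ++ [(t : Int)] := by
      exact_mod_cast PySem.List.pyRange_one_succ_right (a := 0) (b := (t : Int)) (by exact_mod_cast Nat.zero_le t)
    rw [show ((t + 1 : Nat) : Int) = ((t : Nat) : Int) + 1 by push_cast; ring, hsplit,
        List.foldl_append, ih ht']
    simp only [List.foldl_cons, List.foldl_nil, List.range_succ, List.map_append, List.map_cons,
      List.map_nil]
    congr 1
    by_cases hi0 : i = 0
    · subst hi0
      simp [dpCell, Nat.choose_succ_self_right]
    · simp only [if_neg hi0]
      by_cases ht0 : (t : Int) = 0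
      · have : t = 0 := by exact_mod_cast ht0
        subst this
        simp [dpCell]
      · have htpos : 1 ≤ t := by
          rcases Nat.eq_zero_or_pos t with h | h
          · exact absurd (by exact_mod_cast h : (t : Int) = 0) ht0
          · exact h
        simp only [if_neg ht0]
        have hlen : ((List.range t).map (fun j => dpCell i.toNat j)).length = t := by simp
        have hget : PySem.List.pyGet? ((List.range t).map (fun j => dpCell i.toNat j)) ((t : Int) - 1)
            = some (dpCell i.toNat (t - 1)) := by
          have h1 : ((t : Int) - 1) = ((t - 1 : Nat) : Int) := by
            push_cast [htpos]; ring
          rw [h1, PySem.List.pyGet?_natCast]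
          rw [List.getElem?_map]
          rw [List.getElem?_range (by omega)]
          rfl
        rw [hget]
        have hr := hread t (by omega) hi0
        rw [hr]
        simp only [Option.getD_some]
        -- Pascal: C(i+t+1, t) = C(i+t, t-1) + C(i+t, t)
        unfold dpCell
        have hipos : 1 ≤ i.toNat := by omega
        refine congrArg (fun x => [x]) ?_
        have e1 : (i - 1).toNat + t + 1 = i.toNat + t := by omega
        have e2 : i.toNat + (t - 1) + 1 = i.toNat + t := by omega
        rw [e1, e2,
            show (i.toNat + t + 1).choose t = ((i.toNat + t) + 1).choose ((t - 1) + 1) by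
              congr 1; omega,
            Nat.choose_succ_succ,
            show (t - 1).succ = t by omega]
        push_cast
        ring

theorem dp_fold_spec (K N : Nat) :
    (PySem.List.pyRange 0 ((K : Int) + 1) 1).foldl (fun dp i =>
      dp ++ [(PySem.List.pyRange 0 ((N : Int) + 1) 1).foldl (fun row j =>
          row ++ [if i = 0 then j + 1
                  else if j = 0 then 1
                  else ((PySem.List.pyGet? row (j - 1)).getD 0) +
                       (((PySem.List.pyGet? dp (i - 1)).bind
                           (fun r => PySem.List.pyGet? r j)).getD 0)]) []]) []
    = (List.range (K + 1)).map (fun i => (List.range (N + 1)).map (fun j => dpCell i j)) := by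
  induction K with
  | zero =>
    rw [show ((0 : Nat) : Int) + 1 = 0 + 1 by norm_num,
        PySem.List.pyRange_one_singleton,
        show ((N : Int) + 1) = (((N + 1 : Nat) : Int)) by push_cast; ring]
    have h0 := row_fold_spec N 0 [] (N + 1) le_rfl (fun j _ h0c => absurd rfl h0c) le_rfl
    simp only [List.foldl_cons, List.foldl_nil, List.nil_append]
    exact congrArg (fun x => [x]) h0
  | succ K ih =>
    have hsplit : PySem.List.pyRange 0 ((K : Int) + 1 + 1) 1
        = PySem.List.pyRange 0 ((K : Int) + 1) 1 ++ [(K : Int) + 1] := by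
      have := PySem.List.pyRange_one_succ_right (a := 0) (b := (K : Int) + 1)
        (by positivity)
      exact this
    rw [show (((K + 1 : Nat) : Int) + 1) = ((K : Int) + 1 + 1) by push_cast; ring, hsplit,
        List.foldl_append, ih]
    simp only [List.foldl_cons, List.foldl_nil]
    set prevdp := (List.range (K + 1)).map (fun i => (List.range (N + 1)).map (fun j => dpCell i j)) with hprev
    have hread : ∀ j : Nat, j ≤ N → ((K : Int) + 1) ≠ 0 →
        (((PySem.List.pyGet? prevdp ((K : Int) + 1 - 1)).bind
            (fun r => PySem.List.pyGet? r (j : Int))).getD 0) = dpCell ((K : Int) + 1 - 1).toNat j := by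
      intro j hj _
      have h1 : ((K : Int) + 1 - 1) = ((K : Nat) : Int) := by ring
      rw [h1, PySem.List.pyGet?_natCast]
      rw [hprev, List.getElem?_map, List.getElem?_range (by omega)]
      simp only [Option.map_some, Option.bind_some]
      rw [PySem.List.pyGet?_natCast, List.getElem?_map, List.getElem?_range (by omega)]
      simp
    rw [show ((N : Int) + 1) = (((N + 1 : Nat) : Int)) by push_cast; ring]
    rw [row_fold_spec N ((K : Int) + 1) prevdp (N + 1) le_rfl hread (by positivity)]
    rw [List.range_succ (n := K + 1), List.map_append]
    simp only [List.map_cons, List.map_nil]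
    rw [show ((K : Int) + 1).toNat = K + 1 by omega]

-- A, on the natural domain, computes C(k+n, n-1) for n ≥ 1 and 1 for n = 0.
theorem apartment_eq (K N : Nat) :
    apartment (K : Int) (N : Int)
      = if N = 0 then 1 else ((K + N).choose (N - 1) : Int) := by
  unfold apartment
  simp only []
  rw [dp_fold_spec K N]
  have hK : PySem.List.pyGet?
      ((List.range (K + 1)).map (fun i => (List.range (N + 1)).map (fun j => dpCell i j))) (K : Int)
      = some ((List.range (N + 1)).map (fun j => dpCell K j)) := by
    rw [PySem.List.pyGet?_natCast, List.getElem?_map, List.getElem?_range (by omega)]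
    rfl
  rw [hK]
  simp only [Option.bind_some]
  by_cases hN : N = 0
  · subst hN
    rw [show ((0 : Nat) : Int) - 1 = -1 by norm_num, PySem.List.pyGet?_neg_one]
    simp [dpCell]
  · have h1 : ((N : Int) - 1) = ((N - 1 : Nat) : Int) := by omega
    rw [h1, PySem.List.pyGet?_natCast, List.getElem?_map, List.getElem?_range (by omega)]
    simp only [Option.map_some, Option.getD_some, if_neg hN]
    unfold dpCell
    congr 2
    omega

-- B's loop invariant: after the i-th iteration res = C(m, i); needs i ≤ m for the Int subtraction.
theorem alt_fold_spec (M : Nat) (t : Nat) (ht : t ≤ M + 1) :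
    (PySem.List.pyRange 0 (t : Int) 1).foldl
      (fun res i => PySem.Int.floordiv (res * ((M : Int) - i)) (i + 1)) 1
      = (M.choose t : Int) := by
  induction t with
  | zero => simp
  | succ t ih =>
    have hsplit : PySem.List.pyRange 0 ((t : Nat) + 1 : Int) 1
        = PySem.List.pyRange 0 (t : Int) 1 ++ [(t : Int)] := by
      exact_mod_cast PySem.List.pyRange_one_succ_right (a := 0) (b := (t : Int)) (by exact_mod_cast Nat.zero_le t)
    rw [show ((t + 1 : Nat) : Int) = ((t : Nat) : Int) + 1 by push_cast; ring, hsplit,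
        List.foldl_append, ih (by omega)]
    simp only [List.foldl_cons, List.foldl_nil]
    have htM : t ≤ M := by omega
    have hsub : ((M : Int) - (t : Int)) = ((M - t : Nat) : Int) := by omega
    have key : (M.choose t : Int) * ((M : Int) - (t : Int)) = (M.choose (t + 1) : Int) * ((t : Int) + 1) := by
      rw [hsub]
      have := Nat.choose_succ_right_eq M t
      exact_mod_cast this.symm
    rw [key]
    have hpos : ((t : Int) + 1) ≠ 0 := by positivity
    rw [show PySem.Int.floordiv = Int.fdiv from rfl]
    rw [Int.mul_fdiv_cancel _ hpos]

theorem alt_eq (K N : Nat) :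
    apartment_alt (K : Int) (N : Int) = ((K + N).choose (K + 1) : Int) := by
  unfold apartment_alt
  simp only []
  rw [show ((K : Int) + (N : Int)) = (((K + N : Nat) : Int)) by push_cast; ring]
  by_cases hc : (N : Int) - 1 > ((K + N : Nat) : Int) - ((N : Int) - 1)
  · rw [if_pos hc]
    have hr : ((K + N : Nat) : Int) - ((N : Int) - 1) = (((K + 1 : Nat) : Int)) := by push_cast; ring
    rw [hr, if_neg (by push_cast; omega)]
    exact alt_fold_spec (K + N) (K + 1) (by push_cast at hc; omega)
  · rw [if_neg hc]
    by_cases hN : N = 0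
    · subst hN
      rw [if_pos (by norm_num)]
      rw [Nat.choose_eq_zero_of_lt (by omega : K + 0 < K + 1)]
      simp
    · have hN1 : 1 ≤ N := Nat.one_le_iff_ne_zero.mpr hN
      have hr : ((N : Int) - 1) = (((N - 1 : Nat) : Int)) := by push_cast [hN1]; ring
      rw [hr, if_neg (by omega)]
      rw [alt_fold_spec (K + N) (N - 1) (by omega)]
      have h := Nat.choose_symm (show K + 1 ≤ K + N by omega)
      rw [show K + N - (K + 1) = N - 1 by omega] at h
      exact_mod_cast h

-- ===== VERDICT (by name: the statement is the Claim_ definition above) =====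
theorem apartment_spec : Claim_unchanged_apartment := by
  intro k n _ hpre hnD
  obtain ⟨hk, hn⟩ := hpre
  obtain ⟨K, rfl⟩ := Int.eq_ofNat_of_zero_le hk
  obtain ⟨N, rfl⟩ := Int.eq_ofNat_of_zero_le hn
  have hN0 : N ≠ 0 := by
    intro h; exact hnD (by simp [D_apartment, h])
  rw [apartment_eq, alt_eq, if_neg hN0]
  have h := Nat.choose_symm (show K + 1 ≤ K + N by omega)
  rw [show K + N - (K + 1) = N - 1 by omega] at h
  exact_mod_cast h

theorem apartment_changed : Claim_changed_apartment := by
  unfold Claim_changed_apartment; decide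

theorem apartment_tight : Claim_exact_apartment := by
  intro k n _ hpre hD
  obtain ⟨hk, hn⟩ := hpre
  obtain ⟨K, rfl⟩ := Int.eq_ofNat_of_zero_le hk
  have hN : n = ((0 : Nat) : Int) := by simpa [D_apartment] using hD
  rw [hN, apartment_eq, alt_eq, if_pos rfl]
  rw [Nat.choose_eq_zero_of_lt (by omega : K + 0 < K + 1)]
  simp
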